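-- pv_equiv track=rewrite | github.com/Virus936/AOC | year_2024/day09.py | check_none_and_fill
-- ===== SOURCE A (Python) =====
-- def check_none_and_fill(disk):
--     current, l = disk[0], 0
--     empty_blocks = []
--     blocks = []
--     for i, d in enumerate(disk):
--         if d == current:
--             continue
--         if current is None:
--             empty_blocks.append((l, i))
--         else:
--             blocks.append((l, i))
--         l, current = i, d
--     else:
--         if current is None:
--             empty_blocks.append((l, i+1))
--         else:
--             blocks.append((l, i+1))
--     return empty_blocks, blocks
-- ===== SOURCE B (Python) =====
-- def _runs(xs):
--     # maximal runs of equal values, as (key, length), by index scanning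
--     runs = []
--     n = len(xs)
--     i = 0
--     while i < n:
--         key = xs[i]
--         j = i + 1
--         while j < n and xs[j] == key:
--             j += 1
--         runs.append((key, j - i))
--         i = j
--     return runs
--
--
-- def check_none_and_fill(disk):
--     empty_blocks, blocks = [], []
--     start = 0
--     for key, length in _runs(disk):
--         end = start + length
--         if key is None:
--             empty_blocks.append((start, end))
--         else:
--             blocks.append((start, end))
--         start = end
--     return empty_blocks, blocks
-- ===== Notes on version B (the rewrite author's own statement) =====
-- stated objective: alternative
-- what changed: A tracks run boundaries inside one index/current-value scan with a for-else tail case; B first splits the disk into a list of maximal (key, length) runs with a recursive run-splitter and then classifies each run in a separate emission pass over that run list.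
-- outside the precondition, e.g. on check_none_and_fill([]): A raises IndexError, B returns ([], [])
-- crash fix: On the empty list A raises IndexError (it reads disk[0]); B returns ([], []). — e.g. on check_none_and_fill([]): A raises IndexError, B returns ([], [])
import Mathlib
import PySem

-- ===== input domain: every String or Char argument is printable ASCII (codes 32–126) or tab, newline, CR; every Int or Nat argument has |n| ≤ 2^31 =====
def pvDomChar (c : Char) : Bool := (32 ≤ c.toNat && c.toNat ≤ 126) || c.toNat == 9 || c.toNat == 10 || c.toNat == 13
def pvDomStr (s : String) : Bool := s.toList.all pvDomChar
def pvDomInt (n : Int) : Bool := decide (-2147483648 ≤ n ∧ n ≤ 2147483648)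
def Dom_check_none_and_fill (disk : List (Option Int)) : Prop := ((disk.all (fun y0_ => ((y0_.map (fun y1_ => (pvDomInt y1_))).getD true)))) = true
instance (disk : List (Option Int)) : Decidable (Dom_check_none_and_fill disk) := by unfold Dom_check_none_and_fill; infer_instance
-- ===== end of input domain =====

-- B groups the disk into maximal equal runs first (recursive run-splitter) and then classifies
-- each run in one emission pass — a different decomposition than A's single index-tracking scan;
-- objective: alternative (same cost). On the empty list A raises IndexError; B returns ([], []).


-- ===== PORT A =====
-- the for-loop of A: xs is the remaining suffix, i the index of its head;
-- when xs is exhausted the Python 'else' clause runs with i+1 = this i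
def loopA (xs : List (Option Int)) (i : Int) (current : Option Int) (l : Int)
    (eb bs : List (Int × Int)) : (List (Int × Int)) × (List (Int × Int)) :=
  match xs with
  | [] =>
    match current with
    | none => (eb ++ [(l, i)], bs)
    | some _ => (eb, bs ++ [(l, i)])
  | d :: rest =>
    if d == current then loopA rest (i + 1) current l eb bs
    else
      match current with
      | none => loopA rest (i + 1) d i (eb ++ [(l, i)]) bs
      | some _ => loopA rest (i + 1) d i eb (bs ++ [(l, i)])

def check_none_and_fill (disk : List (Option Int)) : (List (Int × Int)) × (List (Int × Int)) :=
  match PySem.List.pyGet? disk 0 with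
  | none => ([], [])   -- disk[0] raises IndexError here; excluded by Pre_
  | some c => loopA disk 0 c 0 [] []

-- ===== PORT B =====
-- Source B _runs: the inner while loop 'while j < n and xs[j] == key: j += 1'
def scanRun (xs : List (Option Int)) (n : Nat) (key : Option Int) (j : Nat) : Nat :=
  if _h : j < n then
    match PySem.List.pyGet? xs (j : Int) with
    | some d => if d == key then scanRun xs n key (j + 1) else j
    | none => j   -- unreachable when n = xs.length
  else j
termination_by n - j

-- the port of runsB cites this bound in its decreasing_by
lemma scanRun_ge (xs : List (Option Int)) (n : Nat) (key : Option Int) (j : Nat) :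
    j ≤ scanRun xs n key j := by
  induction j using scanRun.induct (xs := xs) (n := n) (key := key) with
  | case1 j h d hd heq ih => rw [scanRun]; simp [h, hd, heq]; omega
  | case2 j h d hd heq => rw [scanRun]; simp [h, hd, heq]
  | case3 j h hd => rw [scanRun]; simp [h, hd]
  | case4 j h => rw [scanRun]; simp [h]

-- Source B _runs: the outer index loop accumulating (key, length) runs
def runsB (xs : List (Option Int)) (n : Nat) (i : Nat) (acc : List (Option Int × Nat)) :
    List (Option Int × Nat) :=
  if _h : i < n then
    match PySem.List.pyGet? xs (i : Int) with
    | some key =>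
      let j := scanRun xs n key (i + 1)
      runsB xs n j (acc ++ [(key, j - i)])
    | none => acc   -- unreachable when n = xs.length
  else acc
termination_by n - i
decreasing_by have := scanRun_ge xs n key (i + 1); simp; omega

-- Source B main loop over the run list, state (empty_blocks, blocks, start)
def emitB (st : (List (Int × Int)) × (List (Int × Int))) (start : Int)
    (runs : List (Option Int × Nat)) : (List (Int × Int)) × (List (Int × Int)) :=
  match runs with
  | [] => st
  | (key, len) :: rest =>
    let e := start + (len : Int)
    match key with
    | none => emitB (st.1 ++ [(start, e)], st.2) e rest
    | some _ => emitB (st.1, st.2 ++ [(start, e)]) e rest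

def check_none_and_fill_alt (disk : List (Option Int)) : (List (Int × Int)) × (List (Int × Int)) :=
  emitB ([], []) 0 (runsB disk disk.length 0 [])

-- ===== PRECONDITION & SPEC =====
-- Pre_ excludes exactly the empty list, on which A raises IndexError at disk[0]
def Pre_check_none_and_fill (disk : List (Option Int)) : Prop := disk ≠ []
instance (disk : List (Option Int)) : Decidable (Pre_check_none_and_fill disk) := by
  unfold Pre_check_none_and_fill; infer_instance

def pvWitness_check_none_and_fill : List (Option Int) := [some 1, some 1, none, some 2]

-- On the empty list A raises IndexError (it reads disk[0]); B returns ([], []).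
def Raises_check_none_and_fill (disk : List (Option Int)) : Prop := disk = []
instance (disk : List (Option Int)) : Decidable (Raises_check_none_and_fill disk) := by
  unfold Raises_check_none_and_fill; infer_instance
def pvRaiseWitness_check_none_and_fill : List (Option Int) := []
def pvRaiseWitnessOut_check_none_and_fill : (List (Int × Int)) × (List (Int × Int)) := ([], [])

def Spec_check_none_and_fill (disk : List (Option Int)) (out : (List (Int × Int)) × (List (Int × Int))) : Prop := out = check_none_and_fill_alt disk
instance (disk : List (Option Int)) (out : (List (Int × Int)) × (List (Int × Int))) : Decidable (Spec_check_none_and_fill disk out) := by unfold Spec_check_none_and_fill; infer_instance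

-- ===== CLAIM (what is proved, stated in full; the proofs are below) =====
def Claim_equal_check_none_and_fill : Prop := ∀ (disk : List (Option Int)), Dom_check_none_and_fill disk → Pre_check_none_and_fill disk → Spec_check_none_and_fill disk (check_none_and_fill disk)
def Claim_raises_check_none_and_fill : Prop := (∀ (disk : List (Option Int)), Dom_check_none_and_fill disk → Raises_check_none_and_fill disk → ¬ Pre_check_none_and_fill disk) ∧ (Dom_check_none_and_fill (pvRaiseWitness_check_none_and_fill) ∧ Raises_check_none_and_fill (pvRaiseWitness_check_none_and_fill) ∧ check_none_and_fill_alt (pvRaiseWitness_check_none_and_fill) = pvRaiseWitnessOut_check_none_and_fill)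

-- ===== LEMMAS AND PROOFS =====

-- proof-side helper: length of the leading run equal to key
def runLen (key : Option Int) (xs : List (Option Int)) : Nat :=
  match xs with
  | [] => 0
  | x :: rest => if x == key then 1 + runLen key rest else 0

-- proof-side helper: maximal runs of equal values as (key, length), recursively
def pvRuns (xs : List (Option Int)) : List (Option Int × Nat) :=
  match xs with
  | [] => []
  | key :: rest =>
    let k := 1 + runLen key rest
    (key, k) :: pvRuns (rest.drop (runLen key rest))
termination_by xs.length
decreasing_by simp


-- how A classifies/records the finished current run (proof-side helper)
def pushRun (st : (List (Int × Int)) × (List (Int × Int))) (c : Option Int) (l e : Int) :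
    (List (Int × Int)) × (List (Int × Int)) :=
  match c with
  | none => (st.1 ++ [(l, e)], st.2)
  | some _ => (st.1, st.2 ++ [(l, e)])


lemma scanRun_eq (xs : List (Option Int)) (key : Option Int) (j : Nat) :
    scanRun xs xs.length key j = j + runLen key (xs.drop j) := by
  induction j using scanRun.induct (xs := xs) (n := xs.length) (key := key) with
  | case1 j h d hd heq ih =>
    have h2 : xs[j] = d := by
      have hd' := hd
      simp only [PySem.List.pyGet?_natCast, List.getElem?_eq_getElem h] at hd'
      exact Option.some.inj hd'
    have hx : xs.drop j = d :: xs.drop (j + 1) := by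
      rw [List.drop_eq_getElem_cons h, h2]
    rw [scanRun]
    simp only [h, dif_pos, hd]
    rw [if_pos heq, ih, hx, runLen, if_pos heq]
    omega
  | case2 j h d hd heq =>
    have h2 : xs[j] = d := by
      have hd' := hd
      simp only [PySem.List.pyGet?_natCast, List.getElem?_eq_getElem h] at hd'
      exact Option.some.inj hd'
    have hx : xs.drop j = d :: xs.drop (j + 1) := by
      rw [List.drop_eq_getElem_cons h, h2]
    rw [scanRun]
    simp only [h, dif_pos, hd]
    rw [if_neg heq, hx, runLen, if_neg heq]
    omega
  | case3 j h hd =>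
    simp only [PySem.List.pyGet?_natCast, List.getElem?_eq_none_iff] at hd
    omega
  | case4 j h =>
    have hx : xs.drop j = [] := List.drop_eq_nil_of_le (by omega)
    rw [scanRun]
    simp [h, hx, runLen]

lemma runsB_pvRuns (xs : List (Option Int)) (i : Nat) (acc : List (Option Int × Nat)) :
    runsB xs xs.length i acc = acc ++ pvRuns (xs.drop i) := by
  induction i, acc using runsB.induct (xs := xs) (n := xs.length) with
  | case1 i acc h key hd j ih =>
    have h2 : xs[i] = key := by
      have hd' := hd
      simp only [PySem.List.pyGet?_natCast, List.getElem?_eq_getElem h] at hd'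
      exact Option.some.inj hd'
    have hx : xs.drop i = key :: xs.drop (i + 1) := by
      rw [List.drop_eq_getElem_cons h, h2]
    have hscan : j = (i + 1) + runLen key (xs.drop (i + 1)) := scanRun_eq xs key (i + 1)
    rw [runsB]
    simp only [h, dif_pos, hd]
    show runsB xs xs.length j (acc ++ [(key, j - i)]) = acc ++ pvRuns (xs.drop i)
    rw [ih, hx, pvRuns]
    have hdd : (xs.drop (i + 1)).drop (runLen key (xs.drop (i + 1))) = xs.drop j := by
      rw [List.drop_drop]
      congr 1
      omega
    have hlen : 1 + runLen key (xs.drop (i + 1)) = j - i := by omega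
    rw [hdd, hlen]
    simp
  | case2 i acc h hd =>
    simp only [PySem.List.pyGet?_natCast, List.getElem?_eq_none_iff] at hd
    omega
  | case3 i acc h =>
    have hx : xs.drop i = [] := List.drop_eq_nil_of_le (by omega)
    rw [runsB]
    simp [h, hx, pvRuns]

lemma loopA_emitB (xs : List (Option Int)) : ∀ (i l : Int) (c : Option Int)
    (eb bs : List (Int × Int)),
    loopA xs i c l eb bs =
      emitB (pushRun (eb, bs) c l (i + (runLen c xs : Int))) (i + (runLen c xs : Int))
        (pvRuns (xs.drop (runLen c xs))) := by
  induction xs with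
  | nil =>
    intro i l c eb bs
    cases c <;> simp [loopA, runLen, pvRuns, emitB, pushRun]
  | cons x rest ih =>
    intro i l c eb bs
    by_cases h : (x == c) = true
    · rw [show loopA (x :: rest) i c l eb bs = loopA rest (i + 1) c l eb bs by
        simp [loopA, h]]
      rw [ih]
      have hr : runLen c (x :: rest) = 1 + runLen c rest := by simp [runLen, h]
      have hc : i + ((runLen c (x :: rest) : Nat) : Int) = (i + 1) + (runLen c rest : Int) := by
        rw [hr]; push_cast; ring
      rw [hc, hr, Nat.add_comm 1 (runLen c rest)]
      simp [List.drop_succ_cons]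
    · have hr : runLen c (x :: rest) = 0 := by simp [runLen, h]
      rw [hr]
      simp only [List.drop_zero, Nat.cast_zero, add_zero]
      rw [pvRuns]
      cases c with
      | none =>
        rw [show loopA (x :: rest) i none l eb bs
              = loopA rest (i + 1) x i (eb ++ [(l, i)]) bs by simp [loopA, h]]
        rw [ih]
        cases x with
        | none => simp at h
        | some v =>
          simp [pushRun, emitB]
          rw [add_assoc]
      | some cv =>
        rw [show loopA (x :: rest) i (some cv) l eb bs
              = loopA rest (i + 1) x i eb (bs ++ [(l, i)]) by simp [loopA, h]]
        rw [ih]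
        cases x with
        | none =>
          simp [pushRun, emitB]
          rw [add_assoc]
        | some v =>
          simp [pushRun, emitB]
          rw [add_assoc]

-- ===== VERDICT (by name: the statement is the Claim_ definition above) =====
theorem check_none_and_fill_spec : Claim_equal_check_none_and_fill := by
  intro disk _ hpre
  unfold Spec_check_none_and_fill
  cases disk with
  | nil => exact absurd rfl hpre
  | cons d0 rest =>
    show check_none_and_fill (d0 :: rest) = check_none_and_fill_alt (d0 :: rest)
    rw [show check_none_and_fill (d0 :: rest) = loopA (d0 :: rest) 0 d0 0 [] [] by
      simp [check_none_and_fill, PySem.List.pyGet?, PySem.List.pyIdx?]]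
    rw [loopA_emitB]
    have hr : runLen d0 (d0 :: rest) = 1 + runLen d0 rest := by simp [runLen]
    rw [show check_none_and_fill_alt (d0 :: rest)
          = emitB ([], []) 0 (runsB (d0 :: rest) (d0 :: rest).length 0 []) from rfl]
    rw [runsB_pvRuns]
    simp only [List.drop_zero, List.nil_append]
    rw [pvRuns, hr, Nat.add_comm 1 (runLen d0 rest)]
    simp only [List.drop_succ_cons]
    cases d0 <;> simp [emitB, pushRun]

@[simp]
theorem check_none_and_fill_raises : Claim_raises_check_none_and_fill := by
  unfold Claim_raises_check_none_and_fill
  constructor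
  · intro disk _ hr
    unfold Pre_check_none_and_fill
    simp [Raises_check_none_and_fill] at hr
    simp [hr]
  · refine ⟨by decide, by decide, ?_⟩
    simp [check_none_and_fill_alt, pvRaiseWitness_check_none_and_fill,
      pvRaiseWitnessOut_check_none_and_fill, runsB, emitB]
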